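-- pv_equiv track=rewrite | github.com/seung-min-lee/seung-min-lee-kbo-predictor | kbo_predict.py | check_run_shape
-- ===== SOURCE A (Python) =====
-- def find_runs(seq):
--     runs = []
--     cur, cnt = seq[0], 1
--     for v in seq[1:]:
--         if v == cur: cnt += 1
--         else: runs.append((cur, cnt)); cur = v; cnt = 1
--     runs.append((cur, cnt))
--     return runs
--
-- def check_run_shape(seq):
--     runs = find_runs(seq)
--     lens = [r[1] for r in runs]
--     if len(lens) < 2: return None
--     asc   = lens == sorted(lens)
--     desc  = lens == sorted(lens, reverse=True)
--     peak  = lens.index(max(lens))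
--     mountain = (lens[:peak+1] == sorted(lens[:peak+1]) and
--                 lens[peak:] == sorted(lens[peak:], reverse=True) and
--                 0 < peak < len(lens)-1)
--     vi = lens.index(min(lens))
--     valley = (lens[:vi+1] == sorted(lens[:vi+1], reverse=True) and
--               lens[vi:] == sorted(lens[vi:]) and
--               0 < vi < len(lens)-1)
--     if asc:      return 'asc', lens
--     if desc:     return 'desc', lens
--     if mountain: return 'mountain', lens
--     if valley:   return 'valley', lens
--     return None
-- ===== SOURCE B (Python) =====
-- def check_run_shape(seq):
--     # one linear pass for run lengths, linear monotonic scans instead of sorting,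
--     # single-pass first-argmax/argmin folds instead of max()/min() + .index()
--     lens = []
--     cnt = 1
--     for x, y in zip(seq, seq[1:]):
--         if y == x:
--             cnt += 1
--         else:
--             lens.append(cnt)
--             cnt = 1
--     lens.append(cnt)
--     if len(lens) < 2:
--         return None
--
--     def nondec(a):
--         return all(x <= y for x, y in zip(a, a[1:]))
--
--     def noninc(a):
--         return all(x >= y for x, y in zip(a, a[1:]))
--
--     if nondec(lens):
--         return 'asc', lens
--     if noninc(lens):
--         return 'desc', lens
--     p, mx = 0, lens[0]
--     for i, v in enumerate(lens):
--         if v > mx: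
--             p, mx = i, v
--     if 0 < p < len(lens) - 1 and nondec(lens[:p + 1]) and noninc(lens[p:]):
--         return 'mountain', lens
--     q, mn = 0, lens[0]
--     for i, v in enumerate(lens):
--         if v < mn:
--             q, mn = i, v
--     if 0 < q < len(lens) - 1 and noninc(lens[:q + 1]) and nondec(lens[q:]):
--         return 'valley', lens
--     return None
-- ===== Notes on version B (the rewrite author's own statement) =====
-- stated objective: faster
-- what changed: B replaces A's four sorted-copy comparisons and the max()/min()+list.index() rescans by linear monotonic zip-scans and single-pass first-argmax/argmin folds, classifying the run-length list in O(n).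
import Mathlib
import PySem

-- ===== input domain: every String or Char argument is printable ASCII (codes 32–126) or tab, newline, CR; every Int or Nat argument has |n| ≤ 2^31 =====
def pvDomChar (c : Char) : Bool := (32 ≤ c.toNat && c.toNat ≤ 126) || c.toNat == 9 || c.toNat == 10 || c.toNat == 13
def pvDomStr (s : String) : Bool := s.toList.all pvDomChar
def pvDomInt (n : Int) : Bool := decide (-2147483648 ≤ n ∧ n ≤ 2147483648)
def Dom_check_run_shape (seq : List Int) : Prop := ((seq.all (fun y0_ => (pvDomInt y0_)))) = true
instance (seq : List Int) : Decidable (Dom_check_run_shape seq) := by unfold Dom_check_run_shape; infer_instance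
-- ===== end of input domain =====

-- B replaces A's sorted-copy comparisons and max()/min()+.index() rescans by linear
-- monotonic zip-scans and single-pass first-argmax/argmin folds (objective: faster, asymptotic).

-- ===== PORT A =====
-- literal port of find_runs; Python raises IndexError on seq = [] (outside Pre_), the [] branch is a placeholder
def find_runs (seq : List Int) : List (Int × Int) :=
  match seq with
  | [] => []
  | x :: rest =>
    let s := rest.foldl (fun (s : List (Int × Int) × Int × Int) v =>
        if v == s.2.1 then (s.1, (s.2.1, s.2.2 + 1))
        else (s.1 ++ [(s.2.1, s.2.2)], (v, 1))) ([], (x, 1))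
    s.1 ++ [(s.2.1, s.2.2)]

def check_run_shape (seq : List Int) : Option (String × List Int) :=
  match seq with
  | [] => none  -- Python raises IndexError here (excluded by Pre_)
  | _ :: _ =>
    let runs := find_runs seq
    let lens := runs.map (fun r => r.2)
    if lens.length < 2 then none else
    let asc := lens == PySem.List.sorted lens (fun x => x)
    let desc := lens == PySem.List.sorted lens (fun x => x) true
    -- lens ≠ [] here, so max?/index? are some; getD 0 is never taken
    let mx := (PySem.List.max? lens (fun x => x)).getD 0
    let peak : Int := ((PySem.List.index? lens mx).getD 0 : Nat)
    let mountain :=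
      (PySem.List.slice lens none (some (peak + 1)) ==
         PySem.List.sorted (PySem.List.slice lens none (some (peak + 1))) (fun x => x)) &&
      (PySem.List.slice lens (some peak) none ==
         PySem.List.sorted (PySem.List.slice lens (some peak) none) (fun x => x) true) &&
      (decide (0 < peak) && decide (peak < (lens.length : Int) - 1))
    let mn := (PySem.List.min? lens (fun x => x)).getD 0
    let vi : Int := ((PySem.List.index? lens mn).getD 0 : Nat)
    let valley :=
      (PySem.List.slice lens none (some (vi + 1)) ==
         PySem.List.sorted (PySem.List.slice lens none (some (vi + 1))) (fun x => x) true) &&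
      (PySem.List.slice lens (some vi) none ==
         PySem.List.sorted (PySem.List.slice lens (some vi) none) (fun x => x)) &&
      (decide (0 < vi) && decide (vi < (lens.length : Int) - 1))
    if asc then some ("asc", lens)
    else if desc then some ("desc", lens)
    else if mountain then some ("mountain", lens)
    else if valley then some ("valley", lens)
    else none

-- ===== PORT B =====
-- helper nondec: all(x <= y for x, y in zip(a, a[1:]))
def pvNondec (a : List Int) : Bool :=
  (a.zip (PySem.List.slice a (some 1) none)).all (fun p => decide (p.1 ≤ p.2))
-- helper noninc: all(x >= y for x, y in zip(a, a[1:]))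
def pvNoninc (a : List Int) : Bool :=
  (a.zip (PySem.List.slice a (some 1) none)).all (fun p => decide (p.2 ≤ p.1))

def check_run_shape_alt (seq : List Int) : Option (String × List Int) :=
  let s := (seq.zip (PySem.List.slice seq (some 1) none)).foldl
      (fun (s : List Int × Int) (p : Int × Int) =>
        if p.2 == p.1 then (s.1, s.2 + 1) else (s.1 ++ [s.2], 1)) ([], 1)
  let lens := s.1 ++ [s.2]
  if lens.length < 2 then none
  else if pvNondec lens then some ("asc", lens)
  else if pvNoninc lens then some ("desc", lens)
  else
    let r := (PySem.List.enumerate lens 0).foldl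
        (fun (s : Int × Int) (iv : Int × Int) => if s.2 < iv.2 then (iv.1, iv.2) else s)
        (0, PySem.List.pyGetD lens 0 0)
    if (decide (0 < r.1) && decide (r.1 < (lens.length : Int) - 1)) &&
        pvNondec (PySem.List.slice lens none (some (r.1 + 1))) &&
        pvNoninc (PySem.List.slice lens (some r.1) none) then some ("mountain", lens)
    else
      let q := (PySem.List.enumerate lens 0).foldl
          (fun (s : Int × Int) (iv : Int × Int) => if iv.2 < s.2 then (iv.1, iv.2) else s)
          (0, PySem.List.pyGetD lens 0 0)
      if (decide (0 < q.1) && decide (q.1 < (lens.length : Int) - 1)) &&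
          pvNoninc (PySem.List.slice lens none (some (q.1 + 1))) &&
          pvNondec (PySem.List.slice lens (some q.1) none) then some ("valley", lens)
      else none

-- ===== PRECONDITION & SPEC =====
-- Pre_ excludes only the empty list, on which A raises IndexError (seq[0])
def Pre_check_run_shape (seq : List Int) : Prop := seq ≠ []
instance (seq : List Int) : Decidable (Pre_check_run_shape seq) := by unfold Pre_check_run_shape; infer_instance
def pvWitness_check_run_shape : List Int := [1, 2, 2, 1]

def Spec_check_run_shape (seq : List Int) (out : Option (String × List Int)) : Prop := out = check_run_shape_alt seq
instance (seq : List Int) (out : Option (String × List Int)) : Decidable (Spec_check_run_shape seq out) := by unfold Spec_check_run_shape; infer_instance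

-- ===== CLAIM (what is proved, stated in full; the proofs are below) =====
def Claim_equal_check_run_shape : Prop := ∀ (seq : List Int), Dom_check_run_shape seq → Pre_check_run_shape seq → Spec_check_run_shape seq (check_run_shape seq)

-- ===== LEMMAS AND PROOFS =====

theorem zip_tail_all_iff (R : Int → Int → Prop) [DecidableRel R]
    (htrans : ∀ {a b c}, R a b → R b c → R a c) :
    ∀ (a : List Int), ((a.zip (a.drop 1)).all (fun p => decide (R p.1 p.2)) = true) ↔ a.Pairwise R
  | [] => by simp
  | [x] => by simp
  | x :: y :: t => by
    have ih := zip_tail_all_iff R htrans (y :: t)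
    simp only [List.drop_succ_cons, List.drop_zero, List.zip_cons_cons, List.all_cons,
      Bool.and_eq_true, decide_eq_true_eq] at ih ⊢
    rw [List.pairwise_cons, ← ih]
    constructor
    · rintro ⟨hxy, hrest⟩
      have hp := (List.pairwise_cons.mp (ih.mp hrest)).1
      refine ⟨fun z hz => ?_, hrest⟩
      rcases List.mem_cons.mp hz with rfl | hz
      · exact hxy
      · exact htrans hxy (hp z hz)
    · rintro ⟨hall, hrest⟩
      exact ⟨hall y (by simp), hrest⟩

theorem nondec_iff (a : List Int) : pvNondec a = true ↔ a.Pairwise (· ≤ ·) := by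
  unfold pvNondec
  rw [PySem.List.slice_from a (by norm_num : (0:Int) ≤ 1)]
  exact zip_tail_all_iff (· ≤ ·) (fun h1 h2 => le_trans h1 h2) a

theorem noninc_iff (a : List Int) : pvNoninc a = true ↔ a.Pairwise (fun x y => y ≤ x) := by
  unfold pvNoninc
  rw [PySem.List.slice_from a (by norm_num : (0:Int) ≤ 1)]
  exact zip_tail_all_iff (fun x y => y ≤ x) (fun h1 h2 => le_trans h2 h1) a

theorem sorted_beq_eq_nondec (a : List Int) :
    (a == PySem.List.sorted a (fun x => x)) = pvNondec a := by
  rcases Bool.eq_false_or_eq_true (pvNondec a) with h | h <;> rw [h]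
  · rw [beq_iff_eq]
    exact (PySem.List.sorted_eq_self_of_pairwise a (fun x => x) ((nondec_iff a).mp h)).symm
  · rw [beq_eq_false_iff_ne]
    intro heq
    have hp : a.Pairwise (· ≤ ·) := by
      have := PySem.List.sorted_pairwise a (fun x => x)
      rw [← heq] at this; exact this
    rw [(nondec_iff a).mpr hp] at h; simp at h

theorem sorted_rev_beq_eq_noninc (a : List Int) :
    (a == PySem.List.sorted a (fun x => x) true) = pvNoninc a := by
  rcases Bool.eq_false_or_eq_true (pvNoninc a) with h | h <;> rw [h]
  · rw [beq_iff_eq]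
    exact (PySem.List.sorted_rev_eq_self_of_pairwise a (fun x => x) ((noninc_iff a).mp h)).symm
  · rw [beq_eq_false_iff_ne]
    intro heq
    have hp : a.Pairwise (fun x y => y ≤ x) := by
      have := PySem.List.sorted_pairwise_rev a (fun x => x)
      rw [← heq] at this; exact this
    rw [(noninc_iff a).mpr hp] at h; simp at h


theorem argmax_inv : ∀ (t pre : List Int) (mx : Int) (j : Nat),
    PySem.List.index? pre mx = some j →
    (∀ y ∈ pre, y ≤ mx) →
    ∃ k : Nat,
      PySem.List.index? (pre ++ t)
        ((PySem.List.enumerate t (pre.length : Int)).foldl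
          (fun (s : Int × Int) (iv : Int × Int) => if s.2 < iv.2 then (iv.1, iv.2) else s)
          ((j : Int), mx)).2 = some k ∧
      ((PySem.List.enumerate t (pre.length : Int)).foldl
          (fun (s : Int × Int) (iv : Int × Int) => if s.2 < iv.2 then (iv.1, iv.2) else s)
          ((j : Int), mx)).1 = (k : Int) ∧
      ∀ y ∈ pre ++ t,
        y ≤ ((PySem.List.enumerate t (pre.length : Int)).foldl
          (fun (s : Int × Int) (iv : Int × Int) => if s.2 < iv.2 then (iv.1, iv.2) else s)
          ((j : Int), mx)).2
  | [], pre, mx, j => by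
    intro hidx hb
    exact ⟨j, by simpa using hidx, rfl, by simpa using hb⟩
  | v :: t', pre, mx, j => by
    intro hidx hb
    rw [PySem.List.enumerate_cons, List.foldl_cons]
    by_cases hlt : mx < v
    · simp only [hlt, if_pos]
      have hnm : v ∉ pre := fun hm => absurd (hb v hm) (not_le.mpr hlt)
      have hidx' : PySem.List.index? (pre ++ [v]) v = some pre.length :=
        PySem.List.index?_append_singleton_self pre v hnm
      have hb' : ∀ y ∈ pre ++ [v], y ≤ v := by
        intro y hy
        rcases List.mem_append.mp hy with hy | hy
        · exact le_of_lt (lt_of_le_of_lt (hb y hy) hlt)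
        · simp at hy; omega
      have := argmax_inv t' (pre ++ [v]) v pre.length hidx' hb'
      simpa [List.append_assoc] using this
    · simp only [hlt, if_false]
      have hmem : mx ∈ pre := (PySem.List.index?_isSome_iff pre mx).mp (by rw [hidx]; rfl)
      have hidx' : PySem.List.index? (pre ++ [v]) mx = some j := by
        rw [PySem.List.index?_append_of_mem [v] hmem]; exact hidx
      have hb' : ∀ y ∈ pre ++ [v], y ≤ mx := by
        intro y hy
        rcases List.mem_append.mp hy with hy | hy
        · exact hb y hy
        · simp at hy; omega
      have := argmax_inv t' (pre ++ [v]) mx j hidx' hb'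
      simpa [List.append_assoc] using this

theorem argmin_inv : ∀ (t pre : List Int) (mn : Int) (j : Nat),
    PySem.List.index? pre mn = some j →
    (∀ y ∈ pre, mn ≤ y) →
    ∃ k : Nat,
      PySem.List.index? (pre ++ t)
        ((PySem.List.enumerate t (pre.length : Int)).foldl
          (fun (s : Int × Int) (iv : Int × Int) => if iv.2 < s.2 then (iv.1, iv.2) else s)
          ((j : Int), mn)).2 = some k ∧
      ((PySem.List.enumerate t (pre.length : Int)).foldl
          (fun (s : Int × Int) (iv : Int × Int) => if iv.2 < s.2 then (iv.1, iv.2) else s)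
          ((j : Int), mn)).1 = (k : Int) ∧
      ∀ y ∈ pre ++ t,
        ((PySem.List.enumerate t (pre.length : Int)).foldl
          (fun (s : Int × Int) (iv : Int × Int) => if iv.2 < s.2 then (iv.1, iv.2) else s)
          ((j : Int), mn)).2 ≤ y
  | [], pre, mn, j => by
    intro hidx hb
    exact ⟨j, by simpa using hidx, rfl, by simpa using hb⟩
  | v :: t', pre, mn, j => by
    intro hidx hb
    rw [PySem.List.enumerate_cons, List.foldl_cons]
    by_cases hlt : v < mn
    · simp only [hlt, if_pos]
      have hnm : v ∉ pre := fun hm => absurd (hb v hm) (not_le.mpr hlt)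
      have hidx' : PySem.List.index? (pre ++ [v]) v = some pre.length :=
        PySem.List.index?_append_singleton_self pre v hnm
      have hb' : ∀ y ∈ pre ++ [v], v ≤ y := by
        intro y hy
        rcases List.mem_append.mp hy with hy | hy
        · exact le_of_lt (lt_of_lt_of_le hlt (hb y hy))
        · simp at hy; omega
      have := argmin_inv t' (pre ++ [v]) v pre.length hidx' hb'
      simpa [List.append_assoc] using this
    · simp only [hlt, if_false]
      have hmem : mn ∈ pre := (PySem.List.index?_isSome_iff pre mn).mp (by rw [hidx]; rfl)
      have hidx' : PySem.List.index? (pre ++ [v]) mn = some j := by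
        rw [PySem.List.index?_append_of_mem [v] hmem]; exact hidx
      have hb' : ∀ y ∈ pre ++ [v], mn ≤ y := by
        intro y hy
        rcases List.mem_append.mp hy with hy | hy
        · exact hb y hy
        · simp at hy; omega
      have := argmin_inv t' (pre ++ [v]) mn j hidx' hb'
      simpa [List.append_assoc] using this

theorem argmax_spec (l0 : Int) (ls : List Int) :
    (PySem.List.max? (l0 :: ls) (fun x => x)).getD 0 =
      ((PySem.List.enumerate (l0 :: ls) 0).foldl
        (fun (s : Int × Int) (iv : Int × Int) => if s.2 < iv.2 then (iv.1, iv.2) else s)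
        (0, PySem.List.pyGetD (l0 :: ls) 0 0)).2 ∧
    (((PySem.List.index? (l0 :: ls) ((PySem.List.max? (l0 :: ls) (fun x => x)).getD 0)).getD 0 : Nat) : Int) =
      ((PySem.List.enumerate (l0 :: ls) 0).foldl
        (fun (s : Int × Int) (iv : Int × Int) => if s.2 < iv.2 then (iv.1, iv.2) else s)
        (0, PySem.List.pyGetD (l0 :: ls) 0 0)).1 := by
  have hget : PySem.List.pyGetD (l0 :: ls) 0 0 = l0 := by
    simp [PySem.List.pyGetD, PySem.List.pyGet?, PySem.List.pyIdx?]
  rw [hget, PySem.List.enumerate_cons, List.foldl_cons]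
  simp only [lt_irrefl, if_false]
  have h0 : PySem.List.index? [l0] l0 = some 0 := PySem.List.index?_cons_self l0 []
  obtain ⟨k, h1, h2, h3⟩ :
      ∃ k : Nat,
        PySem.List.index? (l0 :: ls)
          ((PySem.List.enumerate ls (0 + 1)).foldl
            (fun (s : Int × Int) (iv : Int × Int) => if s.2 < iv.2 then (iv.1, iv.2) else s)
            (0, l0)).2 = some k ∧
        ((PySem.List.enumerate ls (0 + 1)).foldl
            (fun (s : Int × Int) (iv : Int × Int) => if s.2 < iv.2 then (iv.1, iv.2) else s)
            (0, l0)).1 = (k : Int) ∧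
        ∀ y ∈ l0 :: ls,
          y ≤ ((PySem.List.enumerate ls (0 + 1)).foldl
            (fun (s : Int × Int) (iv : Int × Int) => if s.2 < iv.2 then (iv.1, iv.2) else s)
            (0, l0)).2 :=
    argmax_inv ls [l0] l0 0 h0 (by simp)
  have hne : (l0 :: ls) ≠ [] := by simp
  obtain ⟨m, hm⟩ := Option.ne_none_iff_exists'.mp
    ((not_iff_not.mpr (PySem.List.max?_eq_none_iff (l0 :: ls) (fun x => x))).mpr hne)
  have hr2mem := (PySem.List.index?_isSome_iff (l0 :: ls) _).mp (by rw [h1]; rfl)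
  have hmr : m = _ := le_antisymm (h3 m (PySem.List.max?_mem hm)) (PySem.List.max?_isMax hm _ hr2mem)
  rw [hm]
  simp only [Option.getD_some]
  rw [hmr, h1]
  exact ⟨rfl, by simpa using h2.symm⟩

theorem argmin_spec (l0 : Int) (ls : List Int) :
    (PySem.List.min? (l0 :: ls) (fun x => x)).getD 0 =
      ((PySem.List.enumerate (l0 :: ls) 0).foldl
        (fun (s : Int × Int) (iv : Int × Int) => if iv.2 < s.2 then (iv.1, iv.2) else s)
        (0, PySem.List.pyGetD (l0 :: ls) 0 0)).2 ∧
    (((PySem.List.index? (l0 :: ls) ((PySem.List.min? (l0 :: ls) (fun x => x)).getD 0)).getD 0 : Nat) : Int) =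
      ((PySem.List.enumerate (l0 :: ls) 0).foldl
        (fun (s : Int × Int) (iv : Int × Int) => if iv.2 < s.2 then (iv.1, iv.2) else s)
        (0, PySem.List.pyGetD (l0 :: ls) 0 0)).1 := by
  have hget : PySem.List.pyGetD (l0 :: ls) 0 0 = l0 := by
    simp [PySem.List.pyGetD, PySem.List.pyGet?, PySem.List.pyIdx?]
  rw [hget, PySem.List.enumerate_cons, List.foldl_cons]
  simp only [lt_irrefl, if_false]
  have h0 : PySem.List.index? [l0] l0 = some 0 := PySem.List.index?_cons_self l0 []
  obtain ⟨k, h1, h2, h3⟩ :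
      ∃ k : Nat,
        PySem.List.index? (l0 :: ls)
          ((PySem.List.enumerate ls (0 + 1)).foldl
            (fun (s : Int × Int) (iv : Int × Int) => if iv.2 < s.2 then (iv.1, iv.2) else s)
            (0, l0)).2 = some k ∧
        ((PySem.List.enumerate ls (0 + 1)).foldl
            (fun (s : Int × Int) (iv : Int × Int) => if iv.2 < s.2 then (iv.1, iv.2) else s)
            (0, l0)).1 = (k : Int) ∧
        ∀ y ∈ l0 :: ls,
          ((PySem.List.enumerate ls (0 + 1)).foldl
            (fun (s : Int × Int) (iv : Int × Int) => if iv.2 < s.2 then (iv.1, iv.2) else s)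
            (0, l0)).2 ≤ y :=
    argmin_inv ls [l0] l0 0 h0 (by simp)
  have hne : (l0 :: ls) ≠ [] := by simp
  obtain ⟨m, hm⟩ := Option.ne_none_iff_exists'.mp
    ((not_iff_not.mpr (PySem.List.min?_eq_none_iff (l0 :: ls) (fun x => x))).mpr hne)
  have hr2mem := (PySem.List.index?_isSome_iff (l0 :: ls) _).mp (by rw [h1]; rfl)
  have hmr : m = _ := le_antisymm (PySem.List.min?_isMin hm _ hr2mem) (h3 m (PySem.List.min?_mem hm))
  rw [hm]
  simp only [Option.getD_some]
  rw [hmr, h1]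
  exact ⟨rfl, by simpa using h2.symm⟩

theorem runs_lens : ∀ (rest : List Int) (prev cnt : Int) (acc : List (Int × Int)),
    ((rest.foldl (fun (s : List (Int × Int) × Int × Int) v =>
        if v == s.2.1 then (s.1, (s.2.1, s.2.2 + 1))
        else (s.1 ++ [(s.2.1, s.2.2)], (v, 1))) (acc, (prev, cnt))).1 ++
      [((rest.foldl (fun (s : List (Int × Int) × Int × Int) v =>
        if v == s.2.1 then (s.1, (s.2.1, s.2.2 + 1))
        else (s.1 ++ [(s.2.1, s.2.2)], (v, 1))) (acc, (prev, cnt))).2.1,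
        (rest.foldl (fun (s : List (Int × Int) × Int × Int) v =>
        if v == s.2.1 then (s.1, (s.2.1, s.2.2 + 1))
        else (s.1 ++ [(s.2.1, s.2.2)], (v, 1))) (acc, (prev, cnt))).2.2)]).map (fun r => r.2)
    = (((prev :: rest).zip rest).foldl
        (fun (s : List Int × Int) (p : Int × Int) =>
          if p.2 == p.1 then (s.1, s.2 + 1) else (s.1 ++ [s.2], 1))
        (acc.map (fun r => r.2), cnt)).1 ++
      [(((prev :: rest).zip rest).foldl
        (fun (s : List Int × Int) (p : Int × Int) =>
          if p.2 == p.1 then (s.1, s.2 + 1) else (s.1 ++ [s.2], 1))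
        (acc.map (fun r => r.2), cnt)).2]
  | [], prev, cnt, acc => by simp
  | v :: rest', prev, cnt, acc => by
    rw [List.zip_cons_cons, List.foldl_cons, List.foldl_cons]
    by_cases h : v = prev
    · simp only [h, beq_self_eq_true, if_pos]
      exact runs_lens rest' prev (cnt + 1) acc
    · simp only [h, beq_iff_eq, if_false]
      have := runs_lens rest' v 1 (acc ++ [(prev, cnt)])
      simpa using this

-- corollary of runs_lens at the ports' initial states
theorem lens_eq (x : Int) (rest : List Int) :
    (find_runs (x :: rest)).map (fun r => r.2)
    = (((x :: rest).zip rest).foldl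
        (fun (s : List Int × Int) (p : Int × Int) =>
          if p.2 == p.1 then (s.1, s.2 + 1) else (s.1 ++ [s.2], 1)) ([], 1)).1 ++
      [(((x :: rest).zip rest).foldl
        (fun (s : List Int × Int) (p : Int × Int) =>
          if p.2 == p.1 then (s.1, s.2 + 1) else (s.1 ++ [s.2], 1)) ([], 1)).2] := by
  have := runs_lens rest x 1 []
  simpa [find_runs] using this

-- ===== VERDICT (by name: the statement is the Claim_ definition above) =====
theorem check_run_shape_spec : Claim_equal_check_run_shape := by
  intro seq _ hpre
  unfold Spec_check_run_shape
  match seq with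
  | [] => exact absurd rfl hpre
  | x :: rest =>
    have hslice : PySem.List.slice (x :: rest) (some 1) none = rest := by
      rw [PySem.List.slice_from _ (by norm_num : (0:Int) ≤ 1)]; simp
    simp only [check_run_shape, check_run_shape_alt, hslice]
    rw [← lens_eq x rest]
    generalize (find_runs (x :: rest)).map (fun r => r.2) = L
    match L with
    | [] => simp
    | [a] => simp
    | l0 :: l1 :: ls =>
      obtain ⟨hmx, hpk⟩ := argmax_spec l0 (l1 :: ls)
      obtain ⟨hmn, hqk⟩ := argmin_spec l0 (l1 :: ls)
      rw [hpk, hqk]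
      clear hmx hmn
      simp only [sorted_beq_eq_nondec, sorted_rev_beq_eq_noninc]
      have hM : ∀ a b c d : Bool, ((a && b) && (c && d)) = (((c && d) && a) && b) := by decide
      rw [hM, hM]
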